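-- pv_equiv track=rewrite | github.com/nicklasorte/spectrum-systems | spectrum_systems/modules/runtime/working_paper_synthesis.py | compute_synthesis_status
-- ===== SOURCE A (Python) =====
-- from typing import Any, Dict, List, Optional, Tuple
--
-- def compute_synthesis_status(section: Dict[str, Any]) -> str:
--     """Return populated/partial/empty based on section evidence items."""
--     items = section.get("evidence_items") or []
--     if not items:
--         return "empty"
--     # partial when any completeness_gap or caveat is present alongside other types
--     types = {i.get("evidence_type") for i in items}
--     gap_types = {"completeness_gap", "caveat"}
--     content_types = types - gap_types
--     if content_types and gap_types & types:
--         return "partial"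
--     if content_types:
--         return "populated"
--     # only gaps/caveats
--     return "partial"
-- ===== SOURCE B (Python) =====
-- def compute_synthesis_status(section):
--     """Return populated/partial/empty based on section evidence items."""
--     items = section.get("evidence_items") or []
--     if not items:
--         return "empty"
--     has_gap = any(i.get("evidence_type") in ("completeness_gap", "caveat") for i in items)
--     return "partial" if has_gap else "populated"
-- ===== Notes on version B (the rewrite author's own statement) =====
-- stated objective: simpler
-- what changed: Replaces building a set of all evidence types plus set-difference/intersection three-way branching with one short-circuiting any() scan for gap types ('partial' iff a gap/caveat occurs, else 'populated').
import Mathlib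
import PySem

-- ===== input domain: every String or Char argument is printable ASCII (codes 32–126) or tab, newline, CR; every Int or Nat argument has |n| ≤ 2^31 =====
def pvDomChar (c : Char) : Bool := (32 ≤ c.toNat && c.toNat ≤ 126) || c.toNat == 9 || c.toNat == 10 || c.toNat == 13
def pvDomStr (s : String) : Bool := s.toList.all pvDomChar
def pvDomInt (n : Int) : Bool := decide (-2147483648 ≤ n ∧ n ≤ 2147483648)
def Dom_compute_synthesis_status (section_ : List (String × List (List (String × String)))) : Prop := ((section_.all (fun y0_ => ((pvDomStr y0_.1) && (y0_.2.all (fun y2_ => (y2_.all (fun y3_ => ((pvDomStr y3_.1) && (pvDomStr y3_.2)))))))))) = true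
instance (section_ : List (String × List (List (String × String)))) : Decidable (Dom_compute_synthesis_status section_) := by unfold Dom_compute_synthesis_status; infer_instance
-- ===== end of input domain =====

-- B replaces the set construction and three-way set-algebra branching by a single
-- short-circuiting any() scan for gap types (objective: simpler).

-- ===== PORT A =====
def compute_synthesis_status (section_ : List (String × List (List (String × String)))) : String :=
  let items := ((PySem.Dict.mk section_).get? "evidence_items").getD []
  if items = [] then "empty"
  else
    let types : PySem.Set (Option String) :=
      PySem.Set.ofList (items.map (fun i => (PySem.Dict.mk i).get? "evidence_type"))
    let gap_types : PySem.Set (Option String) :=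
      PySem.Set.ofList [some "completeness_gap", some "caveat"]
    let content_types := PySem.Set.diff types gap_types
    if content_types ≠ [] ∧ PySem.Set.inter gap_types types ≠ [] then "partial"
    else if content_types ≠ [] then "populated"
    else "partial"

-- ===== PORT B =====
def compute_synthesis_status_alt (section_ : List (String × List (List (String × String)))) : String :=
  let items := ((PySem.Dict.mk section_).get? "evidence_items").getD []
  if items = [] then "empty"
  else if items.any (fun i =>
      ((PySem.Dict.mk i).get? "evidence_type") == some "completeness_gap"
      || ((PySem.Dict.mk i).get? "evidence_type") == some "caveat") then "partial"
  else "populated"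

-- ===== PRECONDITION & SPEC =====
def Spec_compute_synthesis_status (section_ : List (String × List (List (String × String)))) (out : String) : Prop := out = compute_synthesis_status_alt section_
instance (section_ : List (String × List (List (String × String)))) (out : String) : Decidable (Spec_compute_synthesis_status section_ out) := by unfold Spec_compute_synthesis_status; infer_instance

-- ===== CLAIM (what is proved, stated in full; the proofs are below) =====
def Claim_equal_compute_synthesis_status : Prop := ∀ (section_ : List (String × List (List (String × String)))), Dom_compute_synthesis_status section_ → Spec_compute_synthesis_status section_ (compute_synthesis_status section_)

-- ===== LEMMAS AND PROOFS =====

-- the core: for a nonempty list of evidence types, A's set algebra gives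
-- "partial" iff a gap type occurs, else "populated"
theorem pv_key (ts : List (Option String)) (h : ts ≠ []) :
    (let types : PySem.Set (Option String) := PySem.Set.ofList ts
     let gap_types : PySem.Set (Option String) :=
       PySem.Set.ofList [some "completeness_gap", some "caveat"]
     let content_types := PySem.Set.diff types gap_types
     if content_types ≠ [] ∧ PySem.Set.inter gap_types types ≠ [] then "partial"
     else if content_types ≠ [] then "populated"
     else "partial")
    = (if ts.any (fun x => x == some "completeness_gap" || x == some "caveat")
       then "partial" else "populated") := by
  simp only
  have hgap : PySem.Set.ofList [some "completeness_gap", some "caveat"]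
      = [some "completeness_gap", some "caveat"] := by decide
  by_cases hg : ts.any (fun x => x == some "completeness_gap" || x == some "caveat") = true
  · -- some gap type occurs: A returns "partial" in both remaining branches
    simp only [hg, if_true]
    obtain ⟨x, hx, hxg⟩ := List.any_eq_true.mp hg
    have hxmem : x ∈ PySem.Set.ofList ts := (PySem.Set.mem_ofList ts x).mpr hx
    have hinter : PySem.Set.inter (PySem.Set.ofList [some "completeness_gap", some "caveat"]) (PySem.Set.ofList ts) ≠ [] := by
      have hxmem2 : x ∈ [some "completeness_gap", some "caveat"] := by
        rcases Bool.or_eq_true_iff.mp hxg with h1 | h1 <;> simp_all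
      refine List.ne_nil_of_mem (a := x) ?_
      rw [hgap]
      exact List.mem_filter.mpr ⟨hxmem2, by simpa using hxmem⟩
    by_cases hc : PySem.Set.diff (PySem.Set.ofList ts) (PySem.Set.ofList [some "completeness_gap", some "caveat"]) = []
    · simp [hc]
    · simp [hc, hinter]
  · -- no gap type: content_types = types ≠ [], intersection empty → "populated"
    simp only [hg]
    have hall : ∀ x ∈ ts, ¬(x == some "completeness_gap" || x == some "caveat") = true := by
      intro x hx hcon
      exact hg (List.any_eq_true.mpr ⟨x, hx, hcon⟩)
    have hdiff : PySem.Set.diff (PySem.Set.ofList ts) (PySem.Set.ofList [some "completeness_gap", some "caveat"]) = PySem.Set.ofList ts := by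
      unfold PySem.Set.diff
      refine List.filter_eq_self.mpr ?_
      intro x hx
      have hx' : x ∈ ts := (PySem.Set.mem_ofList ts x).mp hx
      have := hall x hx'
      rw [hgap]
      simp_all
    have hne : PySem.Set.ofList ts ≠ [] := by
      obtain ⟨a, tl, rfl⟩ := List.exists_cons_of_ne_nil h
      exact List.ne_nil_of_mem ((PySem.Set.mem_ofList _ a).mpr (by simp))
    have hinter : PySem.Set.inter (PySem.Set.ofList [some "completeness_gap", some "caveat"]) (PySem.Set.ofList ts) = [] := by
      unfold PySem.Set.inter
      rw [hgap]
      refine List.filter_eq_nil_iff.mpr ?_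
      intro x hx hxmem
      have hx' : x ∈ ts := (PySem.Set.mem_ofList ts x).mp (by simpa using hxmem)
      have := hall x hx'
      rcases List.mem_pair.mp hx with rfl | rfl <;> simp_all
    simp [hdiff, hne, hinter]

-- ===== VERDICT (by name: the statement is the Claim_ definition above) =====
theorem compute_synthesis_status_spec : Claim_equal_compute_synthesis_status := by
  intro section_ _
  unfold Spec_compute_synthesis_status compute_synthesis_status compute_synthesis_status_alt
  simp only
  set items := ((PySem.Dict.mk section_).get? "evidence_items").getD [] with hitems
  by_cases h : items = []
  · simp [h]
  · simp only [h, if_false]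
    rw [pv_key (items.map (fun i => (PySem.Dict.mk i).get? "evidence_type")) (by simpa using h)]
    rw [List.any_map]
    rfl
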